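-- pv_equiv track=rewrite | github.com/cotepractice/CodingTest-Solution | yoonhye/KAKAO/2022_TECH_INTERNSHIP/[PGS] 행렬과 연산.py | solution
-- ===== SOURCE A (Python) =====
-- from collections import deque
--
-- def solution(rc, operations):
--     M = len(rc[0])  # 열의 개수
--
--     # 예외처리 (열이 2개만 있는 경우 - 런타임 에러 방지)
--     if M == 2:
--         first_col = deque()
--         last_col = deque()
--         for arr in rc:
--             first_col.append(arr[0])
--             last_col.append(arr[1])
--
--         for op in operations:
--             if op == "Rotate":
--                 last_col.appendleft(first_col.popleft())
--                 first_col.append(last_col.pop())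
--             else:
--                 first_col.appendleft(first_col.pop())
--                 last_col.appendleft(last_col.pop())
--         result = []
--         for fc, lc in zip(first_col, last_col):
--             result.append([fc, lc])
--
--     else:
--         first_col = deque()
--         last_col = deque()
--         rc_deque = deque()
--         for arr in rc:
--             arr = deque(arr)
--             first_col.append(arr.popleft())
--             last_col.append(arr.pop())
--             rc_deque.append(arr)
--
--         for op in operations:
--             if op == "Rotate":
--                 last_col.appendleft(rc_deque[0].pop())
--                 rc_deque[-1].append(last_col.pop())
--                 first_col.append(rc_deque[-1].popleft())
--                 rc_deque[0].appendleft(first_col.popleft())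
--             else:
--                 last_col.appendleft(last_col.pop())
--                 first_col.appendleft(first_col.pop())
--                 rc_deque.appendleft(rc_deque.pop())
--
--         result = []
--         for fc, arr, lc in zip(first_col, rc_deque, last_col):
--             row = []
--             row.append(fc)
--             row.extend(arr)
--             row.append(lc)
--             result.append(row)
--     return result
-- ===== SOURCE B (Python) =====
-- def _cell(g, i, j, R, C):
--     if i == 0 and j > 0:
--         return g[0][j - 1]
--     if j == C - 1 and i > 0:
--         return g[i - 1][C - 1]
--     if i == R - 1:
--         return g[R - 1][j + 1]
--     if j == 0:
--         return g[i + 1][0]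
--     return g[i][j]
--
-- def solution(rc, operations):
--     R, C = len(rc), len(rc[0])
--     rows = [list(r)[:C] for r in rc]
--     for op in operations:
--         if op == "Rotate":
--             g = rows
--             rows = [[_cell(g, i, j, R, C) for j in range(C)] for i in range(R)]
--         else:
--             rows = [rows[-1]] + rows[:-1]
--     return rows
-- ===== Notes on version B (the rewrite author's own statement) =====
-- stated objective: simpler
-- what changed: B stores the matrix as a plain list of rows and rebuilds it per operation (ShiftRow = move last row to the front; Rotate = recompute every cell from an index formula that walks the border ring clockwise), instead of A's three-deque decomposition (first column, inner rows, last column) spliced in place.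
-- outside the precondition, e.g. on solution([[1, 2, 3]], ['Rotate']): A returns [[3, 1, 2]], B returns [[2, 1, 2]]; on solution([[1, 2, 3], [4, 5]], ['ShiftRow']): A returns [[4, 5], [1, 2, 3]], B returns [[4, 5], [1, 2, 3]]
import Mathlib
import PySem

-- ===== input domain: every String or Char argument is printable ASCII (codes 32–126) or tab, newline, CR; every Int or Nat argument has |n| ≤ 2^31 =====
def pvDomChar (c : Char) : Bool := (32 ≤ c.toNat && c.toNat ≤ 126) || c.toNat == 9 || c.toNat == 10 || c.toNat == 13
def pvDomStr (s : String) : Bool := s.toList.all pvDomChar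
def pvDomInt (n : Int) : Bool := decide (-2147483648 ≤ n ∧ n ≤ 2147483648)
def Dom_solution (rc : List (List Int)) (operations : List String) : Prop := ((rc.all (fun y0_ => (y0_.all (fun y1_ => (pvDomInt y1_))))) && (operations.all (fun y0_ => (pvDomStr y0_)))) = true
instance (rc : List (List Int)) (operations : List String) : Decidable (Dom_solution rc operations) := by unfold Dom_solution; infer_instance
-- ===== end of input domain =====

-- B replaces A's three-deque decomposition (first column / inner rows / last column, spliced in
-- place) by a plain list of rows rebuilt per operation from index formulas — simpler, not faster.

-- ===== PORT A =====
-- deques are modelled as Lists: appendleft = cons, append = ++ [x], popleft = headD/tail,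
-- pop = getLastD/dropLast; the headD/getD/getLastD defaults are never consulted on inputs
-- satisfying Pre_solution (where Python never raises).
def stepA2 (p : List Int × List Int) (op : String) : List Int × List Int :=
  if op == "Rotate" then
    let l1 := p.1.headD 0 :: p.2          -- last_col.appendleft(first_col.popleft())
    let f1 := p.1.tail
    let f2 := f1 ++ [l1.getLastD 0]       -- first_col.append(last_col.pop())
    let l2 := l1.dropLast
    (f2, l2)
  else
    (p.1.getLastD 0 :: p.1.dropLast, p.2.getLastD 0 :: p.2.dropLast)

def stepA3 (t : List Int × List (List Int) × List Int) (op : String) :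
    List Int × List (List Int) × List Int :=
  if op == "Rotate" then
    let x := (t.2.1.getD 0 []).getLastD 0                                -- rc_deque[0].pop()
    let inn1 := t.2.1.set 0 ((t.2.1.getD 0 []).dropLast)
    let l1 := x :: t.2.2                                                 -- last_col.appendleft(x)
    let y := l1.getLastD 0                                               -- last_col.pop()
    let l2 := l1.dropLast
    let inn2 := inn1.set (inn1.length - 1) ((inn1.getD (inn1.length - 1) []) ++ [y])  -- rc_deque[-1].append(y)
    let z := (inn2.getD (inn2.length - 1) []).headD 0                    -- rc_deque[-1].popleft()
    let f1 := t.1 ++ [z]                                                 -- first_col.append(z)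
    let inn3 := inn2.set (inn2.length - 1) ((inn2.getD (inn2.length - 1) []).tail)
    let w := f1.headD 0                                                  -- first_col.popleft()
    let f2 := f1.tail
    let inn4 := inn3.set 0 (w :: (inn3.getD 0 []))                       -- rc_deque[0].appendleft(w)
    (f2, inn4, l2)
  else
    (t.1.getLastD 0 :: t.1.dropLast,
     t.2.1.getLastD [] :: t.2.1.dropLast,
     t.2.2.getLastD 0 :: t.2.2.dropLast)

def glue3 : List Int → List (List Int) → List Int → List (List Int)
  | f :: fs, r :: rs, c :: cs => (f :: (r ++ [c])) :: glue3 fs rs cs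
  | _, _, _ => []

def solution (rc : List (List Int)) (operations : List String) : List (List Int) :=
  if (rc.headD []).length = 2 then
    let p0 := rc.foldl (fun (p : List Int × List Int) arr =>
      (p.1 ++ [arr.getD 0 0], p.2 ++ [arr.getD 1 0])) ([], [])
    let p := operations.foldl stepA2 p0
    List.zipWith (fun a b => [a, b]) p.1 p.2
  else
    let t0 := rc.foldl (fun (t : List Int × List (List Int) × List Int) arr =>
      (t.1 ++ [arr.headD 0], t.2.1 ++ [arr.tail.dropLast], t.2.2 ++ [arr.tail.getLastD 0])) ([], [], [])
    let t := operations.foldl stepA3 t0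
    glue3 t.1 t.2.1 t.2.2

-- ===== PORT B =====
-- indexing via getD: exact for the in-range indices reached under Pre_solution.
def cellB (g : List (List Int)) (i j R C : Nat) : Int :=
  if i = 0 ∧ 0 < j then (g.getD 0 []).getD (j - 1) 0
  else if j = C - 1 ∧ 0 < i then (g.getD (i - 1) []).getD (C - 1) 0
  else if i = R - 1 then (g.getD (R - 1) []).getD (j + 1) 0
  else if j = 0 then (g.getD (i + 1) []).getD 0 0
  else (g.getD i []).getD j 0

def rotateB (g : List (List Int)) (R C : Nat) : List (List Int) :=
  (List.range R).map (fun i => (List.range C).map (fun j => cellB g i j R C))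

def stepB (R C : Nat) (rows : List (List Int)) (op : String) : List (List Int) :=
  if op == "Rotate" then rotateB rows R C
  else rows.getLastD [] :: rows.dropLast

def solution_alt (rc : List (List Int)) (operations : List String) : List (List Int) :=
  let R := rc.length
  let C := (rc.headD []).length
  let rows := rc.map (fun r => r.take C)
  operations.foldl (stepB R C) rows

-- ===== PRECONDITION & SPEC =====
-- Pre_ asks for the shape the problem guarantees and A handles coherently: a nonempty matrix
-- whose first row has M ≥ 2 entries, with either M = 2 (then A reads just the first two entries
-- of every row, so rows only need length ≥ 2) or M ≥ 3, at least two rows and all rows of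
-- length M; outside it A either raises (empty matrix, fewer than 2 columns, short ragged rows)
-- or returns splices that are accidents of its deque wiring (single wide row; ragged rows with
-- 3 or more columns).
def Pre_solution (rc : List (List Int)) (operations : List String) : Prop :=
  rc ≠ [] ∧
    (((rc.headD []).length = 2 ∧ ∀ row ∈ rc, 2 ≤ row.length) ∨
     (3 ≤ (rc.headD []).length ∧ 2 ≤ rc.length ∧ ∀ row ∈ rc, row.length = (rc.headD []).length))
instance (rc : List (List Int)) (operations : List String) : Decidable (Pre_solution rc operations) := by
  unfold Pre_solution; infer_instance

def pvWitness_solution : List (List Int) × List String :=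
  ([[1, 2, 3], [4, 5, 6]], ["Rotate", "ShiftRow", "Rotate"])

def Spec_solution (rc : List (List Int)) (operations : List String) (out : List (List Int)) : Prop := out = solution_alt rc operations
instance (rc : List (List Int)) (operations : List String) (out : List (List Int)) : Decidable (Spec_solution rc operations out) := by unfold Spec_solution; infer_instance

-- ===== CLAIM (what is proved, stated in full; the proofs are below) =====
def Claim_equal_solution : Prop := ∀ (rc : List (List Int)) (operations : List String), Dom_solution rc operations → Pre_solution rc operations → Spec_solution rc operations (solution rc operations)

-- ===== LEMMAS AND PROOFS =====

-- getD toolkit -------------------------------------------------------------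
theorem pv_getD_default {α : Type} (l : List α) (i : Nat) (d : α) (h : l.length ≤ i) :
    l.getD i d = d := by
  simp [List.getD, List.getElem?_eq_none h]

theorem pv_headD_eq_getD {α : Type} (l : List α) (d : α) : l.headD d = l.getD 0 d := by
  cases l <;> simp

theorem pv_tail_getD {α : Type} (l : List α) (i : Nat) (d : α) :
    l.tail.getD i d = l.getD (i + 1) d := by
  cases l <;> simp [List.getD]

theorem pv_getLastD_eq_getD {α : Type} (l : List α) (d : α) (h : l ≠ []) :
    l.getLastD d = l.getD (l.length - 1) d := by
  induction l generalizing d with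
  | nil => simp at h
  | cons a t ih =>
    cases t with
    | nil => simp
    | cons b u =>
      rw [List.getLastD_cons, ih _ (by simp)]
      simp [List.getD]
      rfl

theorem pv_set_getD {α : Type} (l : List α) (i j : Nat) (a d : α) :
    (l.set i a).getD j d = if j = i ∧ i < l.length then a else l.getD j d := by
  by_cases hj : j < l.length
  · rw [List.getD_eq_getElem _ _ (by simpa using hj), List.getElem_set]
    split_ifs with h1 h2 h2
    · rfl
    · omega
    · omega
    · rw [List.getD_eq_getElem _ _ hj]
  · rw [pv_getD_default _ _ _ (by simpa using Nat.le_of_not_lt hj)]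
    rw [if_neg (by omega), pv_getD_default _ _ _ (by omega)]

theorem pv_append_single_getD {α : Type} (l : List α) (a : α) (i : Nat) (d : α) :
    (l ++ [a]).getD i d = if i < l.length then l.getD i d else if i = l.length then a else d := by
  split_ifs with h1 h2
  · rw [List.getD_eq_getElem _ _ (by simp; omega), List.getElem_append_left h1,
      List.getD_eq_getElem _ _ h1]
  · subst h2
    rw [List.getD_eq_getElem _ _ (by simp)]
    simp
  · rw [pv_getD_default _ _ _ (by simp; omega)]

theorem pv_dropLast_getD {α : Type} (l : List α) (i : Nat) (d : α) :
    l.dropLast.getD i d = if i + 1 < l.length then l.getD i d else d := by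
  split_ifs with h1
  · rw [List.getD_eq_getElem _ _ (by simp; omega), List.getElem_dropLast,
      List.getD_eq_getElem _ _ (by omega)]
  · rw [pv_getD_default _ _ _ (by simp; omega)]

theorem pv_tail_append {α : Type} (A B : List α) (h : A ≠ []) :
    (A ++ B).tail = A.tail ++ B := by
  cases A with
  | nil => simp at h
  | cons a t => simp

theorem pv_getD_irrel {α : Type} (l : List α) (i : Nat) (d d' : α) (h : i < l.length) :
    l.getD i d = l.getD i d' := by
  rw [List.getD_eq_getElem _ _ h, List.getD_eq_getElem _ _ h]

theorem pv_map_getD {α β : Type} (f : α → β) (l : List α) (i : Nat) (d : β) (h : i < l.length) :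
    (l.map f).getD i d = f (l[i]'h) := by
  rw [List.getD_eq_getElem _ _ (by simpa using h), List.getElem_map]

theorem pv_eq_of_getD {α : Type} (d : α) {l1 l2 : List α} (hlen : l1.length = l2.length)
    (h : ∀ i, i < l1.length → l1.getD i d = l2.getD i d) : l1 = l2 := by
  apply List.ext_getElem hlen
  intro i h1 h2
  have := h i h1
  rwa [List.getD_eq_getElem _ _ h1, List.getD_eq_getElem _ _ h2] at this

-- glue3 --------------------------------------------------------------------
theorem glue3_length (f : List Int) (inn : List (List Int)) (l : List Int)
    (hinn : inn.length = f.length) (hl : l.length = f.length) :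
    (glue3 f inn l).length = f.length := by
  induction f generalizing inn l with
  | nil => simp [glue3]
  | cons a fs ih =>
    cases inn with
    | nil => simp at hinn
    | cons r rs =>
      cases l with
      | nil => simp at hl
      | cons c cs =>
        simp only [glue3, List.length_cons]
        rw [ih rs cs (by simpa using hinn) (by simpa using hl)]

theorem glue3_getD (f : List Int) (inn : List (List Int)) (l : List Int) (i : Nat)
    (hinn : inn.length = f.length) (hl : l.length = f.length) (hi : i < f.length) :
    (glue3 f inn l).getD i [] = f.getD i 0 :: (inn.getD i [] ++ [l.getD i 0]) := by
  induction f generalizing inn l i with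
  | nil => simp at hi
  | cons a fs ih =>
    cases inn with
    | nil => simp at hinn
    | cons r rs =>
      cases l with
      | nil => simp at hl
      | cons c cs =>
        cases i with
        | zero => simp [glue3]
        | succ k =>
          simp only [glue3, List.getD_cons_succ]
          exact ih rs cs k (by simpa using hinn) (by simpa using hl) (by simpa using hi)

-- rotateB ------------------------------------------------------------------
theorem pv_range_map_getD {β : Type} (n : Nat) (g : Nat → β) (i : Nat) (d : β) (h : i < n) :
    ((List.range n).map g).getD i d = g i := by
  rw [List.getD_eq_getElem _ _ (by simpa using h)]
  simp

theorem rotateB_length (g : List (List Int)) (R C : Nat) : (rotateB g R C).length = R := by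
  simp [rotateB]

theorem rotateB_getD (g : List (List Int)) (R C i : Nat) (h : i < R) :
    (rotateB g R C).getD i [] = (List.range C).map (fun j => cellB g i j R C) := by
  simp only [rotateB]
  exact pv_range_map_getD R _ i [] h

-- characterisations of one A-step, wide case (M > 2) ------------------------
theorem rotate3_fst (R C : Nat) (f : List Int) (inn : List (List Int)) (l : List Int)
    (hf : f.length = R) (hinn : inn.length = R) (hl : l.length = R)
    (hrow : ∀ i, i < R → (inn.getD i []).length = C)
    (hR : 2 ≤ R) (hC : 1 ≤ C) (i : Nat) (hi : i < R) :
    (stepA3 (f, inn, l) "Rotate").1.getD i 0 =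
      if i = R - 1 then (inn.getD (R - 1) []).getD 0 0 else f.getD (i + 1) 0 := by
  have h0 := hrow 0 (by omega)
  have hRr := hrow (R - 1) (by omega)
  simp only [stepA3, List.length_set, hinn, beq_self_eq_true, if_true]
  simp only [pv_tail_getD, pv_append_single_getD, pv_set_getD, pv_headD_eq_getD,
    List.length_set, hinn, hf, true_and]
  split_ifs <;> first
    | omega
    | (simp only [pv_append_single_getD]; split_ifs <;> omega)

theorem rotate3_snd (R C : Nat) (f : List Int) (inn : List (List Int)) (l : List Int)
    (hf : f.length = R) (hinn : inn.length = R) (hl : l.length = R)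
    (hrow : ∀ i, i < R → (inn.getD i []).length = C)
    (hR : 2 ≤ R) (hC : 1 ≤ C) (i : Nat) (hi : i < R) :
    (stepA3 (f, inn, l) "Rotate").2.1.getD i [] =
      if i = 0 then f.getD 0 0 :: (inn.getD 0 []).dropLast
      else if i = R - 1 then (inn.getD (R - 1) []).tail ++ [l.getD (R - 1) 0]
      else inn.getD i [] := by
  have h0 := hrow 0 (by omega)
  have hRr := hrow (R - 1) (by omega)
  have hi0ne : inn.getD 0 [] ≠ [] := by intro h; rw [h] at h0; simp at h0; omega
  have hiRne : inn.getD (R - 1) [] ≠ [] := by intro h; rw [h] at hRr; simp at hRr; omega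
  have hlne : l ≠ [] := by intro h; rw [h] at hl; simp at hl; omega
  simp only [stepA3, List.length_set, hinn, beq_self_eq_true, if_true]
  simp only [pv_set_getD, List.length_set, hinn, pv_headD_eq_getD, pv_append_single_getD, hf,
    true_and]
  split_ifs <;> first
    | omega
    | rfl
    | (rw [pv_tail_append _ _ hiRne]
       congr 2
       rw [List.getLastD_cons, pv_getLastD_eq_getD _ _ hlne, hl,
         pv_getD_irrel _ _ _ 0 (by omega)])

theorem rotate3_thd (R C : Nat) (f : List Int) (inn : List (List Int)) (l : List Int)
    (hf : f.length = R) (hinn : inn.length = R) (hl : l.length = R)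
    (hrow : ∀ i, i < R → (inn.getD i []).length = C)
    (hR : 2 ≤ R) (hC : 1 ≤ C) (i : Nat) (hi : i < R) :
    (stepA3 (f, inn, l) "Rotate").2.2.getD i 0 =
      if i = 0 then (inn.getD 0 []).getD (C - 1) 0 else l.getD (i - 1) 0 := by
  have h0 := hrow 0 (by omega)
  have hi0ne : inn.getD 0 [] ≠ [] := by intro h; rw [h] at h0; simp at h0; omega
  simp only [stepA3, List.length_set, hinn, beq_self_eq_true, if_true]
  rw [pv_dropLast_getD]
  rw [if_pos (by simp [hl]; omega)]
  cases i with
  | zero =>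
    simp only [List.getD_cons_zero]
    rw [pv_getLastD_eq_getD _ _ hi0ne, h0]
    simp
  | succ k =>
    simp only [List.getD_cons_succ]
    rw [if_neg (by omega)]
    simp

theorem rotate3_len1 (f : List Int) (inn : List (List Int)) (l : List Int) :
    (stepA3 (f, inn, l) "Rotate").1.length = f.length := by
  simp [stepA3]

theorem rotate3_len2 (f : List Int) (inn : List (List Int)) (l : List Int) :
    (stepA3 (f, inn, l) "Rotate").2.1.length = inn.length := by
  simp [stepA3]

theorem rotate3_len3 (f : List Int) (inn : List (List Int)) (l : List Int) :
    (stepA3 (f, inn, l) "Rotate").2.2.length = l.length := by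
  simp [stepA3]

theorem rotate3_row (R C : Nat) (f : List Int) (inn : List (List Int)) (l : List Int)
    (hf : f.length = R) (hinn : inn.length = R) (hl : l.length = R)
    (hrow : ∀ i, i < R → (inn.getD i []).length = C)
    (hR : 2 ≤ R) (hC : 1 ≤ C) (i : Nat) (hi : i < R) :
    ((stepA3 (f, inn, l) "Rotate").2.1.getD i []).length = C := by
  rw [rotate3_snd R C f inn l hf hinn hl hrow hR hC i hi]
  have h0 := hrow 0 (by omega)
  have hRr := hrow (R - 1) (by omega)
  split_ifs with h1 h2
  · rw [List.length_cons, List.length_dropLast, h0]; omega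
  · rw [List.length_append, List.length_tail, hRr, List.length_cons, List.length_nil]; omega
  · exact hrow i hi

-- one Rotate keeps the glue equal to B's border walk
theorem rotate3_glue (R C : Nat) (f : List Int) (inn : List (List Int)) (l : List Int)
    (hf : f.length = R) (hinn : inn.length = R) (hl : l.length = R)
    (hrow : ∀ i, i < R → (inn.getD i []).length = C)
    (hR : 2 ≤ R) (hC : 1 ≤ C) :
    glue3 (stepA3 (f, inn, l) "Rotate").1 (stepA3 (f, inn, l) "Rotate").2.1
        (stepA3 (f, inn, l) "Rotate").2.2
      = rotateB (glue3 f inn l) R (C + 2) := by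
  have hlen1 : (stepA3 (f, inn, l) "Rotate").1.length = R := by rw [rotate3_len1, hf]
  have hlen2 : (stepA3 (f, inn, l) "Rotate").2.1.length = R := by rw [rotate3_len2, hinn]
  have hlen3 : (stepA3 (f, inn, l) "Rotate").2.2.length = R := by rw [rotate3_len3, hl]
  apply pv_eq_of_getD []
  · rw [glue3_length _ _ _ (by rw [hlen2, hlen1]) (by rw [hlen3, hlen1]), hlen1, rotateB_length]
  · intro i hi
    rw [glue3_length _ _ _ (by rw [hlen2, hlen1]) (by rw [hlen3, hlen1]), hlen1] at hi
    rw [glue3_getD _ _ _ _ (by rw [hlen2, hlen1]) (by rw [hlen3, hlen1]) (by rw [hlen1]; exact hi),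
      rotateB_getD _ _ _ _ hi,
      rotate3_fst R C f inn l hf hinn hl hrow hR hC i hi,
      rotate3_snd R C f inn l hf hinn hl hrow hR hC i hi,
      rotate3_thd R C f inn l hf hinn hl hrow hR hC i hi]
    have h0 := hrow 0 (by omega)
    have hRr := hrow (R - 1) (by omega)
    have hrl : (if i = 0 then f.getD 0 0 :: (inn.getD 0 []).dropLast
        else if i = R - 1 then (inn.getD (R - 1) []).tail ++ [l.getD (R - 1) 0]
        else inn.getD i []).length = C := by
      split_ifs with h1 h2
      · rw [List.length_cons, List.length_dropLast, h0]; omega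
      · rw [List.length_append, List.length_tail, hRr, List.length_cons, List.length_nil]; omega
      · exact hrow i hi
    apply pv_eq_of_getD 0
    · simp only [List.length_cons, List.length_append, hrl, List.length_nil,
        List.length_map, List.length_range]
    · intro j hj
      simp only [List.length_cons, List.length_append, hrl, List.length_nil] at hj
      have hjC : j < C + 2 := by omega
      rw [pv_range_map_getD _ _ _ _ hjC]
      have grow : ∀ k, k < R →
          (glue3 f inn l).getD k [] = f.getD k 0 :: (inn.getD k [] ++ [l.getD k 0]) :=
        fun k hk => glue3_getD f inn l k (by omega) (by omega) (by omega)
      have hiRne : inn.getD (R - 1) [] ≠ [] := by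
        intro h; rw [h] at hRr; simp at hRr; omega
      by_cases hi0 : i = 0
      · subst hi0
        rcases j with _ | k
        · -- top-left corner: left column moves up
          trans (f.getD (0 + 1) 0)
          · rw [List.getD_cons_zero, if_neg (show ¬((0 : Nat) = R - 1) from by omega)]
          · simp only [cellB, eq_self_iff_true, true_and, if_true]
            rw [if_neg (by omega), if_neg (by omega), if_neg (by omega),
              grow (0 + 1) (by omega), List.getD_cons_zero]
        · rcases k with _ | m
          · -- cell (0,1): former top-left value
            trans (f.getD 0 0)
            · rw [List.getD_cons_succ]
              simp only [eq_self_iff_true, if_true]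
              rw [pv_append_single_getD, if_pos (by simp), List.getD_cons_zero]
            · simp only [cellB, eq_self_iff_true, true_and, if_true]
              rw [if_pos (by omega), show (0 : Nat) + 1 - 1 = 0 from rfl, grow 0 (by omega),
                List.getD_cons_zero]
          · -- top row moves right
            trans ((inn.getD 0 []).getD m 0)
            · rw [List.getD_cons_succ]
              simp only [eq_self_iff_true, if_true]
              have hlen : (f.getD 0 0 :: (inn.getD 0 []).dropLast).length = C := by
                rw [List.length_cons, List.length_dropLast, h0]; omega
              rw [pv_append_single_getD, hlen]
              split_ifs with h1 h2
              · rw [List.getD_cons_succ, pv_dropLast_getD, if_pos (by rw [h0]; omega)]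
              · congr 1
                omega
              · omega
            · simp only [cellB, eq_self_iff_true, true_and, if_true]
              rw [if_pos (by omega), show m + 1 + 1 - 1 = m + 1 from by omega,
                grow 0 (by omega), List.getD_cons_succ, pv_append_single_getD,
                if_pos (by rw [h0]; omega)]
      · by_cases hiR : i = R - 1
        · subst hiR
          rcases j with _ | k
          · -- bottom-left corner: bottom row moves left
            trans ((inn.getD (R - 1) []).getD 0 0)
            · rw [List.getD_cons_zero]
              simp only [eq_self_iff_true, if_true]
            · simp only [cellB, eq_self_iff_true, true_and, if_true]
              rw [if_neg (by omega), if_neg (by omega), grow (R - 1) (by omega),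
                List.getD_cons_succ, pv_append_single_getD, if_pos (by rw [hRr]; omega)]
          · have htlen : ((inn.getD (R - 1) []).tail ++ [l.getD (R - 1) 0]).length = C := by
              rw [List.length_append, List.length_tail, hRr, List.length_cons, List.length_nil]
              omega
            rcases Nat.lt_or_ge k C with hk | hk
            · -- bottom row moves left (including into the corner)
              trans ((inn.getD (R - 1) [] ++ [l.getD (R - 1) 0]).getD (k + 1) 0)
              · rw [List.getD_cons_succ]
                simp only [eq_self_iff_true, if_true]
                rw [if_neg hi0, if_neg hi0, pv_append_single_getD, htlen, if_pos hk,
                  ← pv_tail_append _ _ hiRne, pv_tail_getD]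
              · simp only [cellB, eq_self_iff_true, true_and, if_true]
                rw [if_neg (by omega), if_neg (by omega), grow (R - 1) (by omega),
                  List.getD_cons_succ]
            · -- bottom-right corner: right column moves down
              trans (l.getD (R - 1 - 1) 0)
              · rw [List.getD_cons_succ]
                simp only [eq_self_iff_true, if_true]
                rw [if_neg hi0, if_neg hi0, pv_append_single_getD, htlen,
                  if_neg (by omega), if_pos (by omega)]
              · simp only [cellB, eq_self_iff_true, true_and, if_true]
                rw [if_neg (by omega), if_pos (by omega), show C + 2 - 1 = C + 1 from by omega,
                  grow (R - 1 - 1) (by omega), List.getD_cons_succ, pv_append_single_getD,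
                  if_neg (by rw [hrow (R - 1 - 1) (by omega)]; omega),
                  if_pos (by rw [hrow (R - 1 - 1) (by omega)])]
        · -- middle rows
          rcases j with _ | k
          · trans (f.getD (i + 1) 0)
            · rw [List.getD_cons_zero, if_neg hiR]
            · simp only [cellB, eq_self_iff_true, true_and, if_true]
              rw [if_neg (by omega), if_neg (by omega), if_neg hiR, grow (i + 1) (by omega),
                List.getD_cons_zero]
          · rcases Nat.lt_or_ge k C with hk | hk
            · -- interior cell: unchanged
              trans ((inn.getD i []).getD k 0)
              · rw [List.getD_cons_succ, if_neg hi0, if_neg hiR, pv_append_single_getD,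
                  if_pos (by rw [hrow i hi]; omega)]
              · simp only [cellB, eq_self_iff_true, true_and, if_true]
                rw [if_neg (by omega), if_neg (by omega), if_neg hiR, if_neg (by omega),
                  grow i (by omega), List.getD_cons_succ, pv_append_single_getD,
                  if_pos (by rw [hrow i hi]; omega)]
            · -- right column moves down
              trans (l.getD (i - 1) 0)
              · rw [List.getD_cons_succ, if_neg hi0, if_neg hiR, pv_append_single_getD,
                  if_neg (by rw [hrow i hi]; omega), if_pos (by rw [hrow i hi]; omega),
                  if_neg hi0]
              · simp only [cellB, eq_self_iff_true, true_and, if_true]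
                rw [if_neg (by omega), if_pos (by omega), show C + 2 - 1 = C + 1 from by omega,
                  grow (i - 1) (by omega), List.getD_cons_succ, pv_append_single_getD,
                  if_neg (by rw [hrow (i - 1) (by omega)]; omega),
                  if_pos (by rw [hrow (i - 1) (by omega)])]

-- one ShiftRow keeps the glue equal to B's row shift ------------------------
theorem shift3_glue (R : Nat) (f : List Int) (inn : List (List Int)) (l : List Int)
    (hf : f.length = R) (hinn : inn.length = R) (hl : l.length = R) (hR : 1 ≤ R) :
    glue3 (f.getLastD 0 :: f.dropLast) (inn.getLastD [] :: inn.dropLast) (l.getLastD 0 :: l.dropLast)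
      = (glue3 f inn l).getLastD [] :: (glue3 f inn l).dropLast := by
  have hfne : f ≠ [] := by intro h; rw [h] at hf; simp at hf; omega
  have hlne : l ≠ [] := by intro h; rw [h] at hl; simp at hl; omega
  have hinne : inn ≠ [] := by intro h; rw [h] at hinn; simp at hinn; omega
  have hgl : (glue3 f inn l).length = R := by rw [glue3_length _ _ _ (by omega) (by omega), hf]
  have hgne : glue3 f inn l ≠ [] := by intro h; rw [h] at hgl; simp at hgl; omega
  have hgdl : (glue3 f inn l).dropLast.length = R - 1 := by
    rw [List.length_dropLast, hgl]
  apply pv_eq_of_getD []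
  · rw [glue3_length _ _ _ (by simp [hinn, hf]) (by simp [hl, hf])]
    simp only [List.length_cons, List.length_dropLast, hgdl, hf]
  · intro i hi
    rw [glue3_length _ _ _ (by simp [hinn, hf]) (by simp [hl, hf])] at hi
    simp only [List.length_cons, List.length_dropLast, hf] at hi
    rw [glue3_getD _ _ _ _ (by simp [hinn, hf]) (by simp [hl, hf]) (by simp [hf]; omega)]
    cases i with
    | zero =>
      simp only [List.getD_cons_zero]
      rw [pv_getLastD_eq_getD _ _ hfne, pv_getLastD_eq_getD _ _ hinne,
        pv_getLastD_eq_getD _ _ hlne, pv_getLastD_eq_getD _ _ hgne, hgl, hf, hinn, hl,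
        glue3_getD _ _ _ _ (by omega) (by omega) (by omega)]
    | succ k =>
      simp only [List.getD_cons_succ, List.getD_cons_zero]
      rw [pv_dropLast_getD, pv_dropLast_getD, pv_dropLast_getD, pv_dropLast_getD,
        hf, hinn, hl, hgl, if_pos (by omega), if_pos (by omega), if_pos (by omega),
        if_pos (by omega), glue3_getD _ _ _ _ (by omega) (by omega) (by omega)]

-- the fold invariant, wide case --------------------------------------------
theorem fold3 (C : Nat) (ops : List String) :
    ∀ (R : Nat) (f : List Int) (inn : List (List Int)) (l : List Int),
    f.length = R → inn.length = R → l.length = R →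
    (∀ i, i < R → (inn.getD i []).length = C) → 2 ≤ R → 1 ≤ C →
    ops.foldl (stepB R (C + 2)) (glue3 f inn l) =
      glue3 (ops.foldl stepA3 (f, inn, l)).1 (ops.foldl stepA3 (f, inn, l)).2.1
        (ops.foldl stepA3 (f, inn, l)).2.2 := by
  induction ops with
  | nil => intro R f inn l _ _ _ _ _ _; simp
  | cons op ops ih =>
    intro R f inn l hf hinn hl hrow hR hC
    simp only [List.foldl_cons]
    by_cases hop : op = "Rotate"
    · subst hop
      have hstepB : stepB R (C + 2) (glue3 f inn l) "Rotate" = rotateB (glue3 f inn l) R (C + 2) := by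
        simp [stepB]
      rw [hstepB, ← rotate3_glue R C f inn l hf hinn hl hrow hR hC]
      have e := ih R (stepA3 (f, inn, l) "Rotate").1 (stepA3 (f, inn, l) "Rotate").2.1
        (stepA3 (f, inn, l) "Rotate").2.2
        (by rw [rotate3_len1, hf]) (by rw [rotate3_len2, hinn]) (by rw [rotate3_len3, hl])
        (fun i hi => rotate3_row R C f inn l hf hinn hl hrow hR hC i hi) hR hC
      simpa using e
    · have hstepB : stepB R (C + 2) (glue3 f inn l) op =
          (glue3 f inn l).getLastD [] :: (glue3 f inn l).dropLast := by
        simp [stepB, hop]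
      have hstepA : stepA3 (f, inn, l) op =
          (f.getLastD 0 :: f.dropLast, inn.getLastD [] :: inn.dropLast,
           l.getLastD 0 :: l.dropLast) := by
        simp [stepA3, hop]
      rw [hstepB, hstepA, ← shift3_glue R f inn l hf hinn hl (by omega)]
      have hinne : inn ≠ [] := by intro h; rw [h] at hinn; simp at hinn; omega
      have e := ih R (f.getLastD 0 :: f.dropLast) (inn.getLastD [] :: inn.dropLast)
        (l.getLastD 0 :: l.dropLast)
        (by simp [hf]; omega) (by simp [hinn]; omega) (by simp [hl]; omega)
        ?_ hR hC
      · simpa using e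
      · intro i hi
        cases i with
        | zero =>
          simp only [List.getD_cons_zero]
          rw [pv_getLastD_eq_getD _ _ hinne, hinn]
          exact hrow (R - 1) (by omega)
        | succ k =>
          simp only [List.getD_cons_succ]
          rw [pv_dropLast_getD, hinn, if_pos (by omega)]
          exact hrow k (by omega)

-- narrow case (M = 2) -------------------------------------------------------
theorem zip2_getD (f l : List Int) (i : Nat) (hf : i < f.length) (hl : i < l.length) :
    (List.zipWith (fun a b => [a, b]) f l).getD i [] = [f.getD i 0, l.getD i 0] := by
  rw [List.getD_eq_getElem _ _ (by rw [List.length_zipWith]; omega), List.getElem_zipWith,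
    List.getD_eq_getElem _ _ hf, List.getD_eq_getElem _ _ hl]

theorem zip2_length (f l : List Int) (h : l.length = f.length) :
    (List.zipWith (fun a b => [a, b]) f l).length = f.length := by
  rw [List.length_zipWith]; omega

theorem rotate2_glue (R : Nat) (f l : List Int)
    (hf : f.length = R) (hl : l.length = R) (hR : 1 ≤ R) :
    List.zipWith (fun a b => [a, b]) (stepA2 (f, l) "Rotate").1 (stepA2 (f, l) "Rotate").2
      = rotateB (List.zipWith (fun a b => [a, b]) f l) R 2 := by
  have hfne : f ≠ [] := by intro h; rw [h] at hf; simp at hf; omega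
  have hlne : l ≠ [] := by intro h; rw [h] at hl; simp at hl; omega
  have hstep1 : (stepA2 (f, l) "Rotate").1 = f.tail ++ [(f.headD 0 :: l).getLastD 0] := by
    simp [stepA2]
  have hstep2 : (stepA2 (f, l) "Rotate").2 = (f.headD 0 :: l).dropLast := by
    simp [stepA2]
  have hy : (f.headD 0 :: l).getLastD 0 = l.getD (R - 1) 0 := by
    rw [List.getLastD_cons, pv_getLastD_eq_getD _ _ hlne, hl,
      pv_getD_irrel _ _ _ 0 (by omega)]
  have hlen1 : (f.tail ++ [(f.headD 0 :: l).getLastD 0]).length = R := by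
    rw [List.length_append, List.length_tail, hf, List.length_cons, List.length_nil]; omega
  have hlen2 : ((f.headD 0 :: l).dropLast).length = R := by
    rw [List.length_dropLast, List.length_cons, hl]
    omega
  have grow2 : ∀ k, k < R →
      (List.zipWith (fun a b => [a, b]) f l).getD k [] = [f.getD k 0, l.getD k 0] :=
    fun k hk => zip2_getD f l k (by omega) (by omega)
  rw [hstep1, hstep2]
  apply pv_eq_of_getD []
  · rw [zip2_length _ _ (by rw [hlen1, hlen2]), hlen1, rotateB_length]
  · intro i hi
    rw [zip2_length _ _ (by rw [hlen1, hlen2]), hlen1] at hi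
    have hF : (f.tail ++ [(f.headD 0 :: l).getLastD 0]).getD i 0 =
        if i = R - 1 then l.getD (R - 1) 0 else f.getD (i + 1) 0 := by
      rw [pv_append_single_getD, List.length_tail, hf, pv_tail_getD]
      split_ifs with h1 h2 h3 <;> first | rfl | omega | exact hy
    have hL : ((f.headD 0 :: l).dropLast).getD i 0 =
        if i = 0 then f.getD 0 0 else l.getD (i - 1) 0 := by
      rw [pv_dropLast_getD, List.length_cons, hl, if_pos (by omega)]
      rcases i with _ | k
      · simp only [List.getD_cons_zero, pv_headD_eq_getD]
        simp
      · simp only [List.getD_cons_succ, Nat.add_sub_cancel]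
        rw [if_neg (by omega)]
    have gcell : ∀ a b : Nat, a < R →
        ((List.zipWith (fun x y => [x, y]) f l).getD a []).getD b 0
          = if b = 0 then f.getD a 0 else if b = 1 then l.getD a 0 else 0 := by
      intro a b ha
      rw [grow2 a ha]
      rcases b with _ | _ | b <;> simp
    rw [zip2_getD _ _ i (by omega) (by omega), rotateB_getD _ _ _ _ hi,
      show List.range 2 = [0, 1] from rfl, List.map_cons, List.map_cons, List.map_nil,
      hF, hL]
    simp only [cellB, eq_self_iff_true, true_and, if_true]
    split_ifs <;> try omega
    all_goals try (exfalso; tauto)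
    all_goals (repeat' rw [gcell _ _ (by omega)])
    all_goals simp

theorem shift2_glue (R : Nat) (f l : List Int)
    (hf : f.length = R) (hl : l.length = R) (hR : 1 ≤ R) :
    List.zipWith (fun a b => [a, b]) (f.getLastD 0 :: f.dropLast) (l.getLastD 0 :: l.dropLast)
      = (List.zipWith (fun a b => [a, b]) f l).getLastD []
          :: (List.zipWith (fun a b => [a, b]) f l).dropLast := by
  have hfne : f ≠ [] := by intro h; rw [h] at hf; simp at hf; omega
  have hlne : l ≠ [] := by intro h; rw [h] at hl; simp at hl; omega
  have hzlen : (List.zipWith (fun a b => [a, b]) f l).length = R := by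
    rw [zip2_length _ _ (by omega), hf]
  have hzne : List.zipWith (fun a b => [a, b]) f l ≠ [] := by
    intro h; rw [h] at hzlen; simp at hzlen; omega
  apply pv_eq_of_getD []
  · rw [zip2_length _ _ (by simp [hf, hl]), List.length_cons, List.length_dropLast, hf,
      List.length_cons, List.length_dropLast, hzlen]
  · intro i hi
    rw [zip2_length _ _ (by simp [hf, hl]), List.length_cons, List.length_dropLast, hf] at hi
    rw [zip2_getD _ _ i (by simp [hf]; omega) (by simp [hf, hl]; omega)]
    cases i with
    | zero =>
      simp only [List.getD_cons_zero]
      rw [pv_getLastD_eq_getD _ _ hfne, pv_getLastD_eq_getD _ _ hlne,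
        pv_getLastD_eq_getD _ _ hzne, hf, hl, hzlen, zip2_getD _ _ _ (by omega) (by omega)]
    | succ k =>
      simp only [List.getD_cons_succ]
      rw [pv_dropLast_getD, pv_dropLast_getD, pv_dropLast_getD, hf, hl, hzlen,
        if_pos (by omega), if_pos (by omega), if_pos (by omega),
        zip2_getD _ _ _ (by omega) (by omega)]

theorem fold2 (ops : List String) :
    ∀ (R : Nat) (f l : List Int), f.length = R → l.length = R → 1 ≤ R →
    ops.foldl (stepB R 2) (List.zipWith (fun a b => [a, b]) f l) =
      List.zipWith (fun a b => [a, b]) (ops.foldl stepA2 (f, l)).1 (ops.foldl stepA2 (f, l)).2 := by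
  induction ops with
  | nil => intro R f l _ _ _; simp
  | cons op ops ih =>
    intro R f l hf hl hR
    simp only [List.foldl_cons]
    by_cases hop : op = "Rotate"
    · subst hop
      have hstepB : stepB R 2 (List.zipWith (fun a b => [a, b]) f l) "Rotate"
          = rotateB (List.zipWith (fun a b => [a, b]) f l) R 2 := by
        simp [stepB]
      rw [hstepB, ← rotate2_glue R f l hf hl hR]
      have e := ih R (stepA2 (f, l) "Rotate").1 (stepA2 (f, l) "Rotate").2
        (by simp [stepA2, hf, hl]; try omega) (by simp [stepA2, hf, hl]; try omega) hR
      simpa using e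
    · have hstepB : stepB R 2 (List.zipWith (fun a b => [a, b]) f l) op
          = (List.zipWith (fun a b => [a, b]) f l).getLastD []
              :: (List.zipWith (fun a b => [a, b]) f l).dropLast := by
        simp [stepB, hop]
      have hstepA : stepA2 (f, l) op = (f.getLastD 0 :: f.dropLast, l.getLastD 0 :: l.dropLast) := by
        simp [stepA2, hop]
      rw [hstepB, hstepA, ← shift2_glue R f l hf hl hR]
      have e := ih R (f.getLastD 0 :: f.dropLast) (l.getLastD 0 :: l.dropLast)
        (by simp [hf]; omega) (by simp [hl]; omega) hR
      simpa using e

-- initialisation ------------------------------------------------------------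
theorem build2 (rc : List (List Int)) :
    ∀ (a b : List Int),
    rc.foldl (fun (p : List Int × List Int) arr =>
        (p.1 ++ [arr.getD 0 0], p.2 ++ [arr.getD 1 0])) (a, b) =
      (a ++ rc.map (fun r => r.getD 0 0), b ++ rc.map (fun r => r.getD 1 0)) := by
  induction rc with
  | nil => intro a b; simp
  | cons r rs ih =>
    intro a b
    simp only [List.foldl_cons]
    rw [ih]
    simp

theorem build3 (rc : List (List Int)) :
    ∀ (a : List Int) (b : List (List Int)) (c : List Int),
    rc.foldl (fun (t : List Int × List (List Int) × List Int) arr =>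
        (t.1 ++ [arr.headD 0], t.2.1 ++ [arr.tail.dropLast], t.2.2 ++ [arr.tail.getLastD 0])) (a, b, c) =
      (a ++ rc.map (fun r => r.headD 0), b ++ rc.map (fun r => r.tail.dropLast),
       c ++ rc.map (fun r => r.tail.getLastD 0)) := by
  induction rc with
  | nil => intro a b c; simp
  | cons r rs ih =>
    intro a b c
    simp only [List.foldl_cons]
    rw [ih]
    simp

theorem dropLast_append_getLastD {α : Type} (l : List α) (d : α) (h : l ≠ []) :
    l.dropLast ++ [l.getLastD d] = l := by
  have hg : l.getLastD d = l.getLast h := by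
    rw [pv_getLastD_eq_getD _ _ h, List.getLast_eq_getElem,
      List.getD_eq_getElem _ _ (by have := List.length_pos_iff.mpr h; omega)]
  rw [hg]
  exact List.dropLast_concat_getLast h

theorem init2_glue (rc : List (List Int)) (h : ∀ row ∈ rc, 2 ≤ row.length) :
    List.zipWith (fun a b => [a, b]) (rc.map (fun r => r.getD 0 0)) (rc.map (fun r => r.getD 1 0))
      = rc.map (fun r => r.take 2) := by
  induction rc with
  | nil => simp
  | cons r rs ih =>
    have hr := h r (by simp)
    match r, hr with
    | a :: b :: rest, _ =>
      simp only [List.map_cons, List.zipWith_cons_cons]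
      rw [ih (fun row hm => h row (by simp [hm]))]
      simp [List.take]

theorem init3_glue (rc : List (List Int)) (M : Nat) (h : ∀ row ∈ rc, row.length = M)
    (hM : 3 ≤ M) :
    glue3 (rc.map (fun r => r.headD 0)) (rc.map (fun r => r.tail.dropLast))
        (rc.map (fun r => r.tail.getLastD 0)) = rc := by
  induction rc with
  | nil => simp [glue3]
  | cons r rs ih =>
    have hr := h r (by simp)
    simp only [List.map_cons, glue3]
    rw [ih (fun row hm => h row (by simp [hm]))]
    cases r with
    | nil => simp at hr; omega
    | cons a rest =>
      have hrne : rest ≠ [] := by intro he; rw [he] at hr; simp at hr; omega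
      simp only [List.headD_cons, List.tail_cons]
      rw [dropLast_append_getLastD rest 0 hrne]

theorem solution_spec : Claim_equal_solution := by
  intro rc ops hdom hpre
  obtain ⟨hne, hdisj⟩ := hpre
  have hR1 : 1 ≤ rc.length := by
    cases rc with
    | nil => exact absurd rfl hne
    | cons r rs => simp
  unfold Spec_solution solution solution_alt
  by_cases hM : (rc.headD []).length = 2
  · rw [if_pos hM, build2 rc [] []]
    simp only [List.nil_append, hM]
    have hrows2 : ∀ row ∈ rc, 2 ≤ row.length := by
      rcases hdisj with ⟨_, h⟩ | ⟨h3, _, _⟩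
      · exact h
      · exact absurd hM (by omega)
    have e := fold2 ops rc.length (rc.map (fun r => r.getD 0 0)) (rc.map (fun r => r.getD 1 0))
      (by simp) (by simp) hR1
    rw [init2_glue rc hrows2] at e
    exact e.symm
  · rw [if_neg hM, build3 rc [] [] []]
    simp only [List.nil_append]
    obtain ⟨hM3, hR2, hrect⟩ : 3 ≤ (rc.headD []).length ∧ 2 ≤ rc.length ∧
        ∀ row ∈ rc, row.length = (rc.headD []).length := by
      rcases hdisj with ⟨h2, _⟩ | h
      · exact absurd h2 hM
      · exact h
    have htake : rc.map (fun r => r.take (rc.headD []).length) = rc := by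
      rw [List.map_congr_left
        (fun r hr => (List.take_of_length_le (le_of_eq (hrect r hr)) : r.take _ = _)),
        List.map_id']
    rw [htake]
    have hrow' : ∀ i, i < rc.length →
        ((rc.map (fun r => r.tail.dropLast)).getD i []).length = (rc.headD []).length - 2 := by
      intro i hi
      rw [pv_map_getD _ _ _ _ hi]
      rw [List.length_dropLast, List.length_tail, hrect (rc[i]'hi) (List.getElem_mem hi)]
      omega
    have e := fold3 ((rc.headD []).length - 2) ops rc.length (rc.map (fun r => r.headD 0))
      (rc.map (fun r => r.tail.dropLast)) (rc.map (fun r => r.tail.getLastD 0))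
      (by simp) (by simp) (by simp) hrow' hR2 (by omega)
    rw [init3_glue rc (rc.headD []).length hrect hM3,
      show (rc.headD []).length - 2 + 2 = (rc.headD []).length from by omega] at e
    exact e.symm
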